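-- pv_equiv track=rewrite | github.com/brighteast99/coding-test-problems | programmers/연습문제/옹알이 (2)/solution.py | can_pronounce
-- ===== SOURCE A (Python) =====
-- def can_pronounce(word):
--     BABBLINGS = ['aya', 'ye', 'woo', 'ma']
--     last = None
--
--     while len(word):
--         pronouncable = False
--         for BABBLING in BABBLINGS:
--             if word.startswith(BABBLING) and BABBLING != last:
--                 last = BABBLING
--                 word = word[len(BABBLING):]
--                 pronouncable = True
--
--         if not pronouncable:
--             return False
--
--     return True
-- ===== SOURCE B (Python) =====
-- def can_pronounce(word):
--     tokens = []
--     i = 0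
--     while i < len(word):
--         c = word[i]
--         if c == 'a':
--             t = 'aya'
--         elif c == 'y':
--             t = 'ye'
--         elif c == 'w':
--             t = 'woo'
--         elif c == 'm':
--             t = 'ma'
--         else:
--             return False
--         if word[i:i + len(t)] != t:
--             return False
--         tokens.append(t)
--         i += len(t)
--     return all(x != y for x, y in zip(tokens, tokens[1:]))
-- ===== Notes on version B (the rewrite author's own statement) =====
-- stated objective: simpler
-- what changed: B replaces A's restartable multi-token while/for pass that tracks the previously matched babbling by a single first-character-dispatch tokenizer that collects the full token list and then checks adjacent tokens for equality with zip.
import Mathlib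
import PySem

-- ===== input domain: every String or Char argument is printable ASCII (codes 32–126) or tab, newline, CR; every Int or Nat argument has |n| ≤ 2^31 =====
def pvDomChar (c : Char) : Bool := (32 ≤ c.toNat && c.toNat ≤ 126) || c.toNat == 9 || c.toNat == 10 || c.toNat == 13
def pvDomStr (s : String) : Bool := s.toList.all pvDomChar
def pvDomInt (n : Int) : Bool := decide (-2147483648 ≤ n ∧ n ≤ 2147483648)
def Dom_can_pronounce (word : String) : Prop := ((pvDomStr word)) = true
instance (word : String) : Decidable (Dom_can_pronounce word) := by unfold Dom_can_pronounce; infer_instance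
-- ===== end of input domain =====

-- B is a simpler decomposition of the same check: tokenize the whole word by first-character
-- dispatch, then forbid equal adjacent tokens; A interleaves both in one while/for loop that
-- tracks the previously matched babbling. Return values are proved equal on all inputs (A is total).

-- ===== PORT A =====
-- BABBLINGS = ['aya', 'ye', 'woo', 'ma']
def pvTokensA : List (List Char) := [['a','y','a'], ['y','e'], ['w','o','o'], ['m','a']]

-- one iteration of A's inner 'for BABBLING in BABBLINGS' body on the state (word, last, pronouncable);
-- word[len(BABBLING):] is PySem.List.slice with lower bound len(BABBLING)
def pvStepA (st : List Char × Option (List Char) × Bool) (b : List Char) :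
    List Char × Option (List Char) × Bool :=
  if PySem.Chars.startswith st.1 b && !(some b == st.2.1) then
    (PySem.List.slice st.1 (some (b.length : Int)) none, some b, true)
  else st

-- invariant used only for termination of goA (the loop re-enters only after consuming characters)
def pvInvA (n : Nat) (st : List Char × Option (List Char) × Bool) : Prop :=
  st.1.length ≤ n ∧ (st.2.2 = true → st.1.length < n)

theorem pvStepA_inv (n : Nat) (st : List Char × Option (List Char) × Bool) (b : List Char)
    (hb : b ≠ []) (h : pvInvA n st) : pvInvA n (pvStepA st b) := by
  obtain ⟨h1, h2⟩ := h
  unfold pvStepA pvInvA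
  split
  · rename_i hc
    simp only [Bool.and_eq_true] at hc
    have hpre : b <+: st.1 := (PySem.Chars.startswith_iff st.1 b).mp hc.1
    have hlb : b.length ≤ st.1.length := hpre.length_le
    have hbl : 0 < b.length := List.length_pos_iff.mpr hb
    rw [PySem.List.slice_from_natCast]
    constructor
    · simp only [List.length_drop]; omega
    · intro _; simp only [List.length_drop]; omega
  · exact ⟨h1, h2⟩

theorem pvFoldA_inv (n : Nat) (st : List Char × Option (List Char) × Bool) (h : pvInvA n st) :
    pvInvA n (pvTokensA.foldl pvStepA st) := by
  simp only [pvTokensA, List.foldl]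
  exact pvStepA_inv n _ _ (by decide) (pvStepA_inv n _ _ (by decide)
    (pvStepA_inv n _ _ (by decide) (pvStepA_inv n _ _ (by decide) h)))

-- the 'while len(word):' loop of A
def pvGoA (s : List Char) (last : Option (List Char)) : Bool :=
  if s.length = 0 then true
  else
    let st := pvTokensA.foldl pvStepA (s, last, false)
    if hp : st.2.2 = true then pvGoA st.1 st.2.1 else false
termination_by s.length
decreasing_by
  exact (pvFoldA_inv s.length (s, last, false) ⟨le_refl _, by simp⟩).2 hp

def can_pronounce (word : String) : Bool := pvGoA word.toList none

-- ===== PORT B =====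
-- the 'while i < len(word):' loop of Source B, on the remaining suffix word[i:]
-- (the slice comparison word[i:i+len(t)] != t is the take/compare on the suffix;
--  the recursive call advances by len(t), written drop (t.length-1) on the tail so the
--  recursion is on a shorter list — the same characters are consumed)
def pvTokB : List Char → Option (List (List Char))
  | [] => some []
  | c :: cs =>
    let t? : Option (List Char) :=
      if c = 'a' then some ['a','y','a']
      else if c = 'y' then some ['y','e']
      else if c = 'w' then some ['w','o','o']
      else if c = 'm' then some ['m','a']
      else none
    match t? with
    | none => none
    | some t =>
      if (c :: cs).take t.length = t then
        (pvTokB (cs.drop (t.length - 1))).map (fun ts => t :: ts)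
      else none
termination_by s => s.length
decreasing_by
  simp only [List.length_drop, List.length_cons]; omega

-- all(x != y for x, y in zip(tokens, tokens[1:]))
def pvNoAdjB (ts : List (List Char)) : Bool :=
  (ts.zip ts.tail).all (fun p => !(p.1 == p.2))

def can_pronounce_alt (word : String) : Bool :=
  match pvTokB word.toList with
  | none => false
  | some ts => pvNoAdjB ts

-- ===== PRECONDITION & SPEC =====
def Spec_can_pronounce (word : String) (out : Bool) : Prop := out = can_pronounce_alt word
instance (word : String) (out : Bool) : Decidable (Spec_can_pronounce word out) := by unfold Spec_can_pronounce; infer_instance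

-- ===== CLAIM (what is proved, stated in full; the proofs are below) =====
def Claim_equal_can_pronounce : Prop := ∀ (word : String), Dom_can_pronounce word → Spec_can_pronounce word (can_pronounce word)

-- ===== LEMMAS AND PROOFS =====

-- chain semantics: the tokens B finds, threaded with A's 'last' variable
def pvChain : Option (List Char) → List (List Char) → Bool
  | _, [] => true
  | last, t :: ts => (!(some t == last)) && pvChain (some t) ts

def pvRes (s : List Char) (last : Option (List Char)) : Bool :=
  match pvTokB s with
  | none => false
  | some ts => pvChain last ts

theorem pvStepA_res (st : List Char × Option (List Char) × Bool) (b : List Char)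
    (hb : b ∈ pvTokensA) :
    pvRes (pvStepA st b).1 (pvStepA st b).2.1 = pvRes st.1 st.2.1 := by
  unfold pvStepA
  split
  · rename_i hc
    simp only [Bool.and_eq_true, Bool.not_eq_eq_eq_not, Bool.not_true, beq_eq_false_iff_ne,
      ne_eq] at hc
    obtain ⟨hpre, hne⟩ := hc
    obtain ⟨rest, hrest⟩ := (PySem.Chars.startswith_iff st.1 b).mp hpre
    fin_cases hb <;>
      · simp only [← hrest, PySem.List.slice_from_natCast]
        rw [pvRes, pvRes]
        conv_rhs => rw [pvTokB.eq_def]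
        cases hres : pvTokB rest with
        | none => simp [hres]
        | some ts => simp [hres, pvChain, hne]
  · rfl

theorem pvFoldA_res (st : List Char × Option (List Char) × Bool) :
    pvRes (pvTokensA.foldl pvStepA st).1 (pvTokensA.foldl pvStepA st).2.1
      = pvRes st.1 st.2.1 := by
  simp only [pvTokensA, List.foldl]
  rw [pvStepA_res _ _ (by decide), pvStepA_res _ _ (by decide),
    pvStepA_res _ _ (by decide), pvStepA_res _ _ (by decide)]

-- a step whose result has pronouncable = false changed nothing
theorem pvStepA_id (st : List Char × Option (List Char) × Bool) (b : List Char)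
    (h : (pvStepA st b).2.2 = false) : pvStepA st b = st := by
  by_cases hc : (PySem.Chars.startswith st.1 b && !(some b == st.2.1)) = true
  · simp [pvStepA, hc] at h
  · simp [pvStepA, hc]

theorem pvFoldA_id (st : List Char × Option (List Char) × Bool)
    (h : (pvTokensA.foldl pvStepA st).2.2 = false) :
    ∀ b ∈ pvTokensA, pvStepA st b = st := by
  simp only [pvTokensA, List.foldl] at h
  have h4 := pvStepA_id _ _ h
  rw [h4] at h
  have h3 := pvStepA_id _ _ h
  rw [h3] at h h4
  have h2 := pvStepA_id _ _ h
  rw [h2] at h h3 h4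
  have h1 := pvStepA_id _ _ h
  rw [h1] at h2 h3 h4
  intro b hb
  fin_cases hb
  · exact h1
  · exact h2
  · exact h3
  · exact h4

-- if an untaken step's token is actually a prefix of the word, the token equals 'last'
theorem pvStepA_untaken (st : List Char × Option (List Char) × Bool) (b : List Char)
    (h : pvStepA st b = st) (hfl : st.2.2 = false) (hpre : b <+: st.1) : some b = st.2.1 := by
  unfold pvStepA at h
  split at h
  · rename_i hc
    have : st.2.2 = true := by rw [← h]
    simp [hfl] at this
  · rename_i hc
    simp only [Bool.and_eq_true, Bool.not_eq_eq_eq_not, Bool.not_true, beq_eq_false_iff_ne,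
      ne_eq, not_and, not_not] at hc
    exact hc ((PySem.Chars.startswith_iff st.1 b).mpr hpre)

theorem pv_prefix_of_take_eq {α : Type} (l t : List α) (h : l.take t.length = t) :
    t <+: l := by
  refine ⟨l.drop t.length, ?_⟩
  have h2 := List.take_append_drop t.length l
  rw [h] at h2
  exact h2

-- a successful pvTokB step on a nonempty list starts with one of the four tokens, a prefix of the list
theorem pvTokB_cons_shape (c : Char) (cs : List Char) (ts : List (List Char))
    (h : pvTokB (c :: cs) = some ts) :
    ∃ t ts', ts = t :: ts' ∧ t ∈ pvTokensA ∧ t <+: (c :: cs) := by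
  rw [pvTokB.eq_def] at h
  by_cases ha : c = 'a'
  · subst ha
    simp only [reduceIte] at h
    split_ifs at h with htk
    · rw [Option.map_eq_some_iff] at h
      obtain ⟨ts0, _, hts⟩ := h
      exact ⟨_, _, hts.symm, by decide, pv_prefix_of_take_eq _ _ htk⟩
  · by_cases hy : c = 'y'
    · subst hy
      simp only [ha, reduceIte] at h
      split_ifs at h with htk
      · rw [Option.map_eq_some_iff] at h
        obtain ⟨ts0, _, hts⟩ := h
        exact ⟨_, _, hts.symm, by decide, pv_prefix_of_take_eq _ _ htk⟩
    · by_cases hw : c = 'w'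
      · subst hw
        simp only [ha, hy, reduceIte] at h
        split_ifs at h with htk
        · rw [Option.map_eq_some_iff] at h
          obtain ⟨ts0, _, hts⟩ := h
          exact ⟨_, _, hts.symm, by decide, pv_prefix_of_take_eq _ _ htk⟩
      · by_cases hm : c = 'm'
        · subst hm
          simp only [ha, hy, hw, reduceIte] at h
          split_ifs at h with htk
          · rw [Option.map_eq_some_iff] at h
            obtain ⟨ts0, _, hts⟩ := h
            exact ⟨_, _, hts.symm, by decide, pv_prefix_of_take_eq _ _ htk⟩
        · simp [ha, hy, hw, hm] at h

-- when no token is consumable at (s, last) and s is nonempty, the chain value is false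
theorem pvRes_stuck (s : List Char) (last : Option (List Char)) (hs : s.length ≠ 0)
    (hid : ∀ b ∈ pvTokensA, pvStepA (s, last, false) b = (s, last, false)) :
    pvRes s last = false := by
  cases s with
  | nil => simp at hs
  | cons c cs =>
    rw [pvRes]
    cases h : pvTokB (c :: cs) with
    | none => rfl
    | some ts =>
      obtain ⟨t, ts', rfl, htmem, hpre⟩ := pvTokB_cons_shape c cs ts h
      have hlast : some t = last := by
        simpa using pvStepA_untaken ((c :: cs), last, false) t (hid t htmem) rfl hpre
      simp [pvChain, ← hlast]

theorem pvGoA_eq_res (s : List Char) (last : Option (List Char)) :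
    pvGoA s last = pvRes s last := by
  rw [pvGoA]
  split
  · rename_i hs
    have : s = [] := List.length_eq_zero_iff.mp hs
    subst this
    rw [pvRes, pvTokB]
    rfl
  · rename_i hs
    show (if hp : (pvTokensA.foldl pvStepA (s, last, false)).2.2 = true then
        pvGoA (pvTokensA.foldl pvStepA (s, last, false)).1
          (pvTokensA.foldl pvStepA (s, last, false)).2.1
      else false) = pvRes s last
    split
    · rename_i hp
      rw [pvGoA_eq_res _ _]
      exact pvFoldA_res (s, last, false)
    · rename_i hp
      exact (pvRes_stuck s last hs (pvFoldA_id (s, last, false) (by simpa using hp))).symm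
termination_by s.length
decreasing_by
  rename_i hp
  exact (pvFoldA_inv s.length (s, last, false) ⟨le_refl _, by simp⟩).2 hp

theorem pvChain_some (ts : List (List Char)) (t : List Char) :
    pvChain (some t) ts
      = ((match ts with | [] => true | u :: _ => !(u == t)) && pvNoAdjB ts) := by
  induction ts generalizing t with
  | nil => simp [pvChain, pvNoAdjB]
  | cons u us ih =>
    rw [pvChain, ih u]
    cases us with
    | nil => simp [pvNoAdjB]
    | cons v vs =>
      simp only [pvNoAdjB, List.tail_cons, List.zip_cons_cons, List.all_cons]
      rw [show (some u == some t) = (u == t) from rfl, Bool.beq_comm (a := v) (b := u)]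

theorem pvChain_none (ts : List (List Char)) : pvChain none ts = pvNoAdjB ts := by
  cases ts with
  | nil => simp [pvChain, pvNoAdjB]
  | cons t us =>
    rw [pvChain, pvChain_some]
    cases us with
    | nil => simp [pvNoAdjB]
    | cons v vs =>
      simp [pvNoAdjB]
      rw [Bool.beq_comm]

-- ===== VERDICT (by name: the statement is the Claim_ definition above) =====
theorem can_pronounce_spec : Claim_equal_can_pronounce := by
  intro word _
  unfold Spec_can_pronounce can_pronounce can_pronounce_alt
  rw [pvGoA_eq_res, pvRes]
  cases pvTokB word.toList with
  | none => rfl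
  | some ts => simp only [pvChain_none]
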